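-- pv_equiv track=rewrite | github.com/ulelab/hnRNPH1_IR_MAF | scripts/process_maf_spliceai_v3.py | ungapped_position_to_gapped
-- ===== SOURCE A (Python) =====
-- def ungapped_position_to_gapped(sequence, ungapped_pos):
--     """
--     Convert an ungapped position (0-based) to a gapped position in the sequence
--     Ignores gaps (-, *, spaces) when counting
--     Returns: gapped position (0-based) or -1 if position is beyond sequence
--     """
--     if ungapped_pos < 0:
--         return -1
--
--     ungapped_count = 0
--     for i, char in enumerate(sequence):
--         if char not in ['-', '*', ' ', '\n', '\r']:
--             if ungapped_count == ungapped_pos: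
--                 return i
--             ungapped_count += 1
--
--     # Position is beyond the sequence
--     return -1
-- ===== SOURCE B (Python) =====
-- def ungapped_position_to_gapped(sequence, ungapped_pos):
--     """
--     Convert an ungapped position (0-based) to a gapped position in the sequence
--     by building the table of gapped positions of all non-gap characters once,
--     then indexing it directly.
--     Returns: gapped position (0-based) or -1 if position is beyond sequence
--     """
--     if ungapped_pos < 0:
--         return -1
--     idxs = [i for i, c in enumerate(sequence) if c not in ('-', '*', ' ', '\n', '\r')]
--     return idxs[ungapped_pos] if ungapped_pos < len(idxs) else -1
-- ===== Notes on version B (the rewrite author's own statement) =====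
-- stated objective: alternative
-- what changed: Replaced A's single early-terminating scan with a mutable counter by building the full table of gapped positions of non-gap characters once and indexing it directly; the counter and early return disappear.
import Mathlib
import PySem

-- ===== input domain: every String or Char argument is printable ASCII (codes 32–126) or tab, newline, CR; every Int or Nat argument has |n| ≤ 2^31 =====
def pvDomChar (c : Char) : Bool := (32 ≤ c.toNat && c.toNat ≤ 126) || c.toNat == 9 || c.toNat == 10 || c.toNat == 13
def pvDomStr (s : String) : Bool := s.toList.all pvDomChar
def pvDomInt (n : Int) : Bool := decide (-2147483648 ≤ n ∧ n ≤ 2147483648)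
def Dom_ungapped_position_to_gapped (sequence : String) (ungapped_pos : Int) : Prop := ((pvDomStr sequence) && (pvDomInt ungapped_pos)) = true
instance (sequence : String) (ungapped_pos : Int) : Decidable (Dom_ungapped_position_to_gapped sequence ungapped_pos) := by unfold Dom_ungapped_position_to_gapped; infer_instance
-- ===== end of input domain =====

-- B builds the full table of gapped positions of non-gap characters and indexes it, instead of A's early-terminating counting scan.

-- ===== PORT A =====
-- the for-loop of A: index i, running ungapped_count, early return on the match
def pvALoop (ungapped_pos : Int) : List Char → Nat → Int → Int
  | [], _, _ => -1
  | c :: rest, i, cnt =>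
    if ¬ (c ∈ ['-', '*', ' ', '\n', '\r']) then
      if cnt = ungapped_pos then (i : Int)
      else pvALoop ungapped_pos rest (i + 1) (cnt + 1)
    else pvALoop ungapped_pos rest (i + 1) cnt

def ungapped_position_to_gapped (sequence : String) (ungapped_pos : Int) : Int :=
  if ungapped_pos < 0 then -1
  else pvALoop ungapped_pos sequence.toList 0 0

-- ===== PORT B =====
-- the comprehension of B: gapped positions of all non-gap characters, in order
def pvIdxs : List Char → Nat → List Int
  | [], _ => []
  | c :: rest, i =>
    if c ∈ ['-', '*', ' ', '\n', '\r'] then pvIdxs rest (i + 1)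
    else (i : Int) :: pvIdxs rest (i + 1)

def ungapped_position_to_gapped_alt (sequence : String) (ungapped_pos : Int) : Int :=
  if ungapped_pos < 0 then -1
  else
    let idxs := pvIdxs sequence.toList 0
    if ungapped_pos < (idxs.length : Int) then PySem.List.pyGetD idxs ungapped_pos (-1)
    else -1

-- ===== PRECONDITION & SPEC =====
def Spec_ungapped_position_to_gapped (sequence : String) (ungapped_pos : Int) (out : Int) : Prop := out = ungapped_position_to_gapped_alt sequence ungapped_pos
instance (sequence : String) (ungapped_pos : Int) (out : Int) : Decidable (Spec_ungapped_position_to_gapped sequence ungapped_pos out) := by unfold Spec_ungapped_position_to_gapped; infer_instance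

-- ===== CLAIM (what is proved, stated in full; the proofs are below) =====
def Claim_equal_ungapped_position_to_gapped : Prop := ∀ (sequence : String) (ungapped_pos : Int), Dom_ungapped_position_to_gapped sequence ungapped_pos → Spec_ungapped_position_to_gapped sequence ungapped_pos (ungapped_position_to_gapped sequence ungapped_pos)

-- ===== LEMMAS AND PROOFS =====
lemma pvALoop_eq_fetch (p : Int) (l : List Char) (i : Nat) (cnt : Int)
    (h : 0 ≤ cnt) (hle : cnt ≤ p) :
    pvALoop p l i cnt =
      (if p - cnt < ((pvIdxs l i).length : Int) then PySem.List.pyGetD (pvIdxs l i) (p - cnt) (-1)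
       else -1) := by
  induction l generalizing i cnt with
  | nil => simp [pvALoop, pvIdxs]; omega
  | cons c rest ih =>
    by_cases hg : c ∈ ['-', '*', ' ', '\n', '\r']
    · simpa [pvALoop, pvIdxs, hg] using ih (i + 1) cnt h hle
    · by_cases he : cnt = p
      · subst he
        simp [pvALoop, pvIdxs, hg, PySem.List.pyGetD, PySem.List.pyGet?, PySem.List.pyIdx?]
      · have hlt : cnt + 1 ≤ p := by omega
        rw [show pvALoop p (c :: rest) i cnt = pvALoop p rest (i + 1) (cnt + 1) by
              simp [pvALoop, hg, he]]
        rw [ih (i + 1) (cnt + 1) (by omega) hlt]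
        have hpos : 0 < p - cnt := by omega
        simp only [pvIdxs, if_neg hg, List.length_cons]
        obtain ⟨m, hm⟩ : ∃ m : Nat, p - cnt - 1 = (m : Int) := ⟨(p - cnt - 1).toNat, (Int.toNat_of_nonneg (by omega)).symm⟩
        have hpc : p - cnt = ((m + 1 : Nat) : Int) := by omega
        have hpc1 : p - (cnt + 1) = ((m : Nat) : Int) := by omega
        rw [hpc, hpc1]
        have h01 : (0:Int) ≤ (m : Int) + 1 := by omega
        by_cases hm2 : m < (pvIdxs rest (i + 1)).length
        · simp [PySem.List.pyGetD, PySem.List.pyGet?, PySem.List.pyIdx?, hm2, h01]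
        · simp [hm2]

-- ===== VERDICT (by name: the statement is the Claim_ definition above) =====
theorem ungapped_position_to_gapped_spec : Claim_equal_ungapped_position_to_gapped := by
  intro s p _
  unfold Spec_ungapped_position_to_gapped ungapped_position_to_gapped ungapped_position_to_gapped_alt
  by_cases hp : p < 0
  · simp [hp]
  · simp only [if_neg hp]
    rw [pvALoop_eq_fetch p s.toList 0 0 le_rfl (by omega)]
    norm_num
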